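-- pv_equiv track=rewrite | github.com/er8877/prime_numbers | prime_number2.py | recognize_n
-- ===== SOURCE A (Python) =====
-- def recognize_n(n):
--     counter = 0
--     nums = []
--     for i in range(1, n+1):
--         if n % i == 0:
--             nums.append(i)
--
--     if len(nums) <= 2:
--         return "prime", nums
--     else:
--         return "composite", nums
-- ===== SOURCE B (Python) =====
-- def recognize_n(n):
--     small = []
--     large = []
--     i = 1
--     while i * i <= n:
--         if n % i == 0:
--             small.append(i)
--             q = n // i
--             if q != i:
--                 large.append(q)
--         i += 1
--     large.reverse()
--     nums = small + large
--     if len(nums) <= 2: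
--         return "prime", nums
--     else:
--         return "composite", nums
-- ===== Notes on version B (the rewrite author's own statement) =====
-- stated objective: faster
-- what changed: B collects divisor pairs by trial division up to sqrt(n) and concatenates the small divisors with the reversed list of cofactors, instead of testing every i in 1..n.
import Mathlib
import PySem

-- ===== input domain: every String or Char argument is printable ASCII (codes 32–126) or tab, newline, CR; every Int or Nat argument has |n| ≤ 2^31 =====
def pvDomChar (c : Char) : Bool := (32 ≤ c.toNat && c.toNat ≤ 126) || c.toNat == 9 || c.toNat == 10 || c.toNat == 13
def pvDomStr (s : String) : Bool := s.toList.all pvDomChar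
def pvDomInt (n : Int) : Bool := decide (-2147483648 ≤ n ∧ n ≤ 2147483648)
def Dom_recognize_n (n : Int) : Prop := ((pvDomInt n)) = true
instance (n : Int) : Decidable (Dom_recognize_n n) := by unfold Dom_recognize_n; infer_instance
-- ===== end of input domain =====

-- B lists divisor pairs by trial division up to sqrt(n) (O(sqrt n)) instead of scanning 1..n (O(n)); same return value.

-- ===== PORT A =====
def recognize_n (n : Int) : String × List Int :=
  let nums := (PySem.List.pyRange 1 (n + 1) 1).foldl
    (fun acc i => if PySem.Int.mod n i == 0 then acc ++ [i] else acc) []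
  if nums.length ≤ 2 then ("prime", nums) else ("composite", nums)

-- ===== PORT B =====
-- the while loop of Source B: state (small, large), i counts up while i*i ≤ n
def recognizeAltLoop (n i : Int) (small large : List Int) : List Int × List Int :=
  if _h : i * i ≤ n then
    if PySem.Int.mod n i == 0 then
      let q := PySem.Int.floordiv n i
      recognizeAltLoop n (i + 1) (small ++ [i]) (if q ≠ i then large ++ [q] else large)
    else recognizeAltLoop n (i + 1) small large
  else (small, large)
termination_by (n + 1 - i).toNat
decreasing_by
  all_goals
    have hii : i ≤ i * i := by
      by_cases h0 : i ≤ 0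
      · exact le_trans h0 (mul_self_nonneg i)
      · exact le_mul_of_one_le_left (by omega) (by omega)
    omega

def recognize_n_alt (n : Int) : String × List Int :=
  let p := recognizeAltLoop n 1 [] []
  let nums := p.1 ++ p.2.reverse
  if nums.length ≤ 2 then ("prime", nums) else ("composite", nums)

-- ===== PRECONDITION & SPEC =====
def Spec_recognize_n (n : Int) (out : String × List Int) : Prop := out = recognize_n_alt n
instance (n : Int) (out : String × List Int) : Decidable (Spec_recognize_n n out) := by unfold Spec_recognize_n; infer_instance

-- ===== CLAIM (what is proved, stated in full; the proofs are below) =====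
def Claim_equal_recognize_n : Prop := ∀ (n : Int), Dom_recognize_n n → Spec_recognize_n n (recognize_n n)

-- ===== LEMMAS AND PROOFS =====

-- i*i ≤ n ↔ i ≤ √n, for 1 ≤ i, 0 ≤ n
theorem pv_sqrt_bridge (n i : Int) (hi : 1 ≤ i) (hn : 0 ≤ n) :
    i * i ≤ n ↔ i ≤ Int.sqrt n := by
  have h1 : Int.sqrt n = ((Nat.sqrt n.toNat : Nat) : Int) := rfl
  rw [h1]
  have h2 : i = ((i.toNat : Nat) : Int) := by omega
  rw [h2, ← Nat.cast_mul, Nat.cast_le, Nat.le_sqrt]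
  constructor
  · intro h; omega
  · intro h
    have := Nat.mul_le_mul h h
    omega

-- basic facts about the cofactor n / d of a positive divisor d of n ≥ 1
theorem pv_div_facts (n d : Int) (hn : 1 ≤ n) (hd : 1 ≤ d) (hdvd : d ∣ n) :
    1 ≤ n / d ∧ (n / d) * d = n ∧ (n / d) ∣ n ∧ n / (n / d) = d := by
  obtain ⟨c, hc⟩ := hdvd
  have hd0 : d ≠ 0 := by omega
  have hcd : n / d = c := by rw [hc, Int.mul_ediv_cancel_left _ hd0]
  have hc1 : 1 ≤ c := by nlinarith
  have hc0 : c ≠ 0 := by omega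
  refine ⟨by omega, by rw [hcd, hc]; ring, ⟨d, by rw [hcd, hc]; ring⟩, ?_⟩
  rw [hcd, hc, mul_comm d c, Int.mul_ediv_cancel_left _ hc0]

-- the while loop produces the small divisors in [i, √n] and their cofactors
theorem pv_loop_spec (n : Int) (hn : 1 ≤ n) :
    ∀ (k : Nat) (i : Int) (small large : List Int), 1 ≤ i → (Int.sqrt n + 1 - i).toNat = k →
    recognizeAltLoop n i small large =
      (small ++ (PySem.List.pyRange i (Int.sqrt n + 1) 1).filter (fun d => PySem.Int.mod n d == 0),
       large ++ ((PySem.List.pyRange i (Int.sqrt n + 1) 1).filter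
           (fun d => (PySem.Int.mod n d == 0) && decide (PySem.Int.floordiv n d ≠ d))).map
         (fun d => PySem.Int.floordiv n d)) := by
  intro k
  induction k with
  | zero =>
      intro i small large hi hk
      have hs : Int.sqrt n + 1 ≤ i := by omega
      have hii : ¬ (i * i ≤ n) := by
        intro h
        have := (pv_sqrt_bridge n i hi (by omega)).1 h
        omega
      rw [recognizeAltLoop]
      simp [hii, PySem.List.pyRange_one_eq_nil hs]
  | succ k ih =>
      intro i small large hi hk
      have hile : i ≤ Int.sqrt n := by
        have := Int.sqrt_nonneg n
        omega
      have hii : i * i ≤ n := (pv_sqrt_bridge n i hi (by omega)).2 hile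
      rw [recognizeAltLoop, dif_pos hii, PySem.List.pyRange_one_cons (by omega)]
      by_cases hd : (PySem.Int.mod n i == 0) = true
      · rw [if_pos hd, ih (i + 1) _ _ (by omega) (by omega)]
        rw [List.filter_cons_of_pos (by simpa using hd),
            List.filter_cons]
        by_cases hq : PySem.Int.floordiv n i ≠ i
        · simp [hd, hq]
        · simp [hd, hq]
      · rw [if_neg hd, ih (i + 1) _ _ (by omega) (by omega)]
        rw [List.filter_cons_of_neg (by simpa using hd),
            List.filter_cons_of_neg (by simp [hd])]

-- A's accumulation loop is a filter
theorem pv_numsA (n : Int) :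
    (PySem.List.pyRange 1 (n + 1) 1).foldl
      (fun acc i => if PySem.Int.mod n i == 0 then acc ++ [i] else acc) [] =
    (PySem.List.pyRange 1 (n + 1) 1).filter (fun i => PySem.Int.mod n i == 0) := by
  simpa using PySem.List.foldl_append_if_eq_filter
    (fun i => PySem.Int.mod n i == 0) (PySem.List.pyRange 1 (n + 1) 1) []

-- the two divisor lists are equal (n ≥ 1): both are strictly increasing with the same members
theorem pv_nums_eq (n : Int) (hn : 1 ≤ n) :
    ((PySem.List.pyRange 1 (Int.sqrt n + 1) 1).filter (fun d => PySem.Int.mod n d == 0)) ++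
      (((PySem.List.pyRange 1 (Int.sqrt n + 1) 1).filter
          (fun d => (PySem.Int.mod n d == 0) && decide (PySem.Int.floordiv n d ≠ d))).map
        (fun d => PySem.Int.floordiv n d)).reverse =
    (PySem.List.pyRange 1 (n + 1) 1).filter (fun i => PySem.Int.mod n i == 0) := by
  have hs1 : 1 ≤ Int.sqrt n := (pv_sqrt_bridge n 1 le_rfl (by omega)).1 (by omega)
  have hsn : Int.sqrt n ≤ n := by
    have := (pv_sqrt_bridge n (Int.sqrt n) hs1 (by omega)).2 le_rfl
    nlinarith
  set s := Int.sqrt n with hsdef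
  have hfd : ∀ d : Int, 1 ≤ d → PySem.Int.floordiv n d = n / d := fun d hd =>
    PySem.Int.floordiv_eq_ediv_of_pos (by omega)
  set Sf := (PySem.List.pyRange 1 (s + 1) 1).filter (fun d => PySem.Int.mod n d == 0) with hSf
  set F := (PySem.List.pyRange 1 (s + 1) 1).filter
      (fun d => (PySem.Int.mod n d == 0) && decide (PySem.Int.floordiv n d ≠ d)) with hF
  set Af := (PySem.List.pyRange 1 (n + 1) 1).filter (fun i => PySem.Int.mod n i == 0) with hAf
  -- membership characterisations
  have memS : ∀ x, x ∈ Sf ↔ (1 ≤ x ∧ x ≤ s ∧ x ∣ n) := by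
    intro x
    rw [hSf]
    simp only [List.mem_filter, PySem.List.mem_pyRange_one, beq_iff_eq,
      PySem.Int.mod_eq_zero_iff_dvd]
    constructor
    · rintro ⟨⟨h1, h2⟩, h3⟩; exact ⟨h1, by omega, h3⟩
    · rintro ⟨h1, h2, h3⟩; exact ⟨⟨h1, by omega⟩, h3⟩
  have memF : ∀ x, x ∈ F ↔ (1 ≤ x ∧ x ≤ s ∧ x ∣ n ∧ n / x ≠ x) := by
    intro x
    rw [hF]
    simp only [List.mem_filter, PySem.List.mem_pyRange_one, Bool.and_eq_true, beq_iff_eq,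
      PySem.Int.mod_eq_zero_iff_dvd, decide_eq_true_eq]
    constructor
    · rintro ⟨⟨h1, h2⟩, h3, h4⟩; rw [hfd x h1] at h4; exact ⟨h1, by omega, h3, h4⟩
    · rintro ⟨h1, h2, h3, h4⟩; exact ⟨⟨h1, by omega⟩, h3, by rw [hfd x h1]; exact h4⟩
  have memA : ∀ x, x ∈ Af ↔ (1 ≤ x ∧ x ≤ n ∧ x ∣ n) := by
    intro x
    rw [hAf]
    simp only [List.mem_filter, PySem.List.mem_pyRange_one, beq_iff_eq,
      PySem.Int.mod_eq_zero_iff_dvd]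
    constructor
    · rintro ⟨⟨h1, h2⟩, h3⟩; exact ⟨h1, by omega, h3⟩
    · rintro ⟨h1, h2, h3⟩; exact ⟨⟨h1, by omega⟩, h3⟩
  -- the cofactor of an element of F is large
  have hbig : ∀ d, 1 ≤ d → d ≤ s → d ∣ n → n / d ≠ d → s < n / d := by
    intro d h1 h2 h3 h4
    obtain ⟨hq1, hq2, hq3, hq4⟩ := pv_div_facts n d hn h1 h3
    by_contra hle
    push Not at hle
    have hqq : (n / d) * (n / d) ≤ n := (pv_sqrt_bridge n (n / d) hq1 (by omega)).2 hle
    have hdd : d * d ≤ n := (pv_sqrt_bridge n d h1 (by omega)).2 h2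
    have : n / d = d := by nlinarith
    exact h4 this
  -- membership of the concatenation
  have memB : ∀ x, x ∈ Sf ++ ((F.map (fun d => PySem.Int.floordiv n d)).reverse) ↔ x ∈ Af := by
    intro x
    rw [List.mem_append, List.mem_reverse, List.mem_map, memA, memS]
    constructor
    · rintro (⟨h1, h2, h3⟩ | ⟨d, hdF, hdx⟩)
      · exact ⟨h1, by omega, h3⟩
      · obtain ⟨h1, h2, h3, h4⟩ := (memF d).1 hdF
        obtain ⟨hq1, hq2, hq3, hq4⟩ := pv_div_facts n d hn h1 h3
        rw [hfd d h1] at hdx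
        subst hdx
        exact ⟨hq1, by nlinarith, hq3⟩
    · rintro ⟨h1, h2, h3⟩
      by_cases hxs : x ≤ s
      · exact Or.inl ⟨h1, hxs, h3⟩
      · push Not at hxs
        obtain ⟨hq1, hq2, hq3, hq4⟩ := pv_div_facts n x hn h1 h3
        refine Or.inr ⟨n / x, (memF (n / x)).2 ⟨hq1, ?_, hq3, ?_⟩, ?_⟩
        · have hxx : ¬ (x * x ≤ n) := by
            intro h
            have := (pv_sqrt_bridge n x h1 (by omega)).1 h
            omega
          push Not at hxx
          have hlt : n / x < x := by nlinarith
          have : (n / x) * (n / x) ≤ n := by nlinarith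
          exact (pv_sqrt_bridge n (n / x) hq1 (by omega)).1 this
        · rw [hq4]
          intro h
          have hlt : n / x < x := by
            have hxx : ¬ (x * x ≤ n) := by
              intro hxx
              have := (pv_sqrt_bridge n x h1 (by omega)).1 hxx
              omega
            push Not at hxx
            nlinarith
          omega
        · rw [hfd (n / x) hq1, hq4]
  -- strict sortedness of both sides
  have pR : (PySem.List.pyRange 1 (s + 1) 1).Pairwise (· < ·) :=
    PySem.List.pairwise_lt_pyRange_one 1 (s + 1)
  have pSf : Sf.Pairwise (· < ·) := pR.sublist List.filter_sublist
  have pF : F.Pairwise (· < ·) := pR.sublist List.filter_sublist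
  have pAf : Af.Pairwise (· < ·) :=
    (PySem.List.pairwise_lt_pyRange_one 1 (n + 1)).sublist List.filter_sublist
  have pRev : ((F.map (fun d => PySem.Int.floordiv n d)).reverse).Pairwise (· < ·) := by
    rw [List.pairwise_reverse, List.pairwise_map]
    refine List.Pairwise.imp_of_mem ?_ pF
    intro a b ha hb hab
    obtain ⟨ha1, ha2, ha3, ha4⟩ := (memF a).1 ha
    obtain ⟨hb1, hb2, hb3, hb4⟩ := (memF b).1 hb
    obtain ⟨hqa1, hqa2, _, _⟩ := pv_div_facts n a hn ha1 ha3
    obtain ⟨hqb1, hqb2, _, _⟩ := pv_div_facts n b hn hb1 hb3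
    rw [hfd a ha1, hfd b hb1]
    nlinarith
  have pB : (Sf ++ ((F.map (fun d => PySem.Int.floordiv n d)).reverse)).Pairwise (· < ·) := by
    rw [List.pairwise_append]
    refine ⟨pSf, pRev, ?_⟩
    intro x hx y hy
    obtain ⟨hx1, hx2, _⟩ := (memS x).1 hx
    rw [List.mem_reverse, List.mem_map] at hy
    obtain ⟨d, hdF, hdy⟩ := hy
    obtain ⟨hd1, hd2, hd3, hd4⟩ := (memF d).1 hdF
    rw [hfd d hd1] at hdy
    have := hbig d hd1 hd2 hd3 hd4
    omega
  -- conclude: equal members + both strictly sorted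
  haveI : Std.Antisymm ((· < ·) : Int → Int → Prop) :=
    ⟨fun a b h1 h2 => absurd h2 (lt_asymm h1)⟩
  have n1 : (Sf ++ ((F.map (fun d => PySem.Int.floordiv n d)).reverse)).Nodup :=
    pB.imp (fun h => ne_of_lt h)
  have n2 : Af.Nodup := pAf.imp (fun h => ne_of_lt h)
  exact List.Perm.eq_of_pairwise' pB pAf ((List.perm_ext_iff_of_nodup n1 n2).2 memB)

theorem recognize_n_spec_lemma : ∀ (n : Int), recognize_n n = recognize_n_alt n := by
  intro n
  by_cases hn : 1 ≤ n
  · simp only [recognize_n, recognize_n_alt]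
    rw [pv_numsA, pv_loop_spec n hn (Int.sqrt n + 1 - 1).toNat 1 [] [] le_rfl rfl]
    simp only [List.nil_append]
    rw [pv_nums_eq n hn]
  · simp only [recognize_n, recognize_n_alt]
    rw [recognizeAltLoop]
    rw [PySem.List.pyRange_one_eq_nil (by omega)]
    simp [hn]

-- ===== VERDICT (by name: the statement is the Claim_ definition above) =====
theorem recognize_n_spec : Claim_equal_recognize_n := by
  intro n _
  exact recognize_n_spec_lemma n
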